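-- pv_equiv track=rewrite | github.com/Andreilomakin/- | module_2_7.py | get_rebus
-- ===== SOURCE A (Python) =====
-- def get_rebus (number):
--     rebus = ''
--     for i in range(1, number):
--         for j in range(2, number):
--             if j <= i:
--                 continue
--             if number % (i + j) == 0:
--                 rebus += str(i) + str(j)
--     return rebus
-- ===== SOURCE B (Python) =====
-- def get_rebus(number):
--     # every qualifying i+j is a positive divisor of number, so enumerate
--     # divisors once and emit j = d - i for each i, instead of an O(n^2) scan
--     divs = [d for d in range(1, number + 1) if number % d == 0]
--     parts = []
--     for i in range(1, number):
--         for d in divs: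
--             if 2 * i < d and d <= number - 1 + i:
--                 parts.append(str(i) + str(d - i))
--     return ''.join(parts)
-- ===== Notes on version B (the rewrite author's own statement) =====
-- stated objective: faster
-- what changed: Instead of testing every pair (i,j) with a nested O(n^2) scan, B enumerates the divisors of number once and, for each i, emits j = d - i for each divisor d in the admissible range, since every qualifying i+j is a positive divisor of number.
import Mathlib
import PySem

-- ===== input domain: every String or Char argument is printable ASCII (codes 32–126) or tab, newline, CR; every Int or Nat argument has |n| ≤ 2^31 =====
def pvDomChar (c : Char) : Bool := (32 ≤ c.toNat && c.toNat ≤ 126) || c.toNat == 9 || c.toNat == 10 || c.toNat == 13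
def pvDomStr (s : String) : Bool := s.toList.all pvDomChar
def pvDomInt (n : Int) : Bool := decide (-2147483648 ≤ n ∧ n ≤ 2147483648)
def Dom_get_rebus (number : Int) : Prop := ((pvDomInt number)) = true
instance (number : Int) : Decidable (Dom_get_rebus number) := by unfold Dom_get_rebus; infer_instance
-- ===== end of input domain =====

-- B replaces A's O(n^2) double scan by enumerating the divisors of `number` once and
-- emitting j = d - i for each i and divisor d in range (same output, fewer candidates).

-- ===== PORT A =====
def get_rebus (number : Int) : String :=
  (PySem.List.pyRange 1 number 1).foldl (fun rebus i =>
    (PySem.List.pyRange 2 number 1).foldl (fun rebus j =>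
      if j ≤ i then rebus
      else if PySem.Int.mod number (i + j) = 0 then
        rebus ++ PySem.Int.toStr i ++ PySem.Int.toStr j
      else rebus) rebus) ""

-- ===== PORT B =====
def get_rebus_alt (number : Int) : String :=
  let divs := (PySem.List.pyRange 1 (number + 1) 1).filter
      (fun d => decide (PySem.Int.mod number d = 0))
  let parts := (PySem.List.pyRange 1 number 1).foldl (fun parts i =>
    divs.foldl (fun parts d =>
      if 2 * i < d ∧ d ≤ number - 1 + i then
        parts ++ [PySem.Int.toStr i ++ PySem.Int.toStr (d - i)]
      else parts) parts) ([] : List String)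
  PySem.Str.join "" parts

-- ===== PRECONDITION & SPEC =====
def Spec_get_rebus (number : Int) (out : String) : Prop := out = get_rebus_alt number
instance (number : Int) (out : String) : Decidable (Spec_get_rebus number out) := by unfold Spec_get_rebus; infer_instance

-- ===== CLAIM (what is proved, stated in full; the proofs are below) =====
def Claim_equal_get_rebus : Prop := ∀ (number : Int), Dom_get_rebus number → Spec_get_rebus number (get_rebus number)

-- ===== LEMMAS AND PROOFS =====

/-- Concatenation of a list of strings (proof-side normal form for both ports). -/
def pvJoin : List String → String
  | [] => ""
  | s :: r => s ++ pvJoin r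

theorem pvJoin_append (l₁ l₂ : List String) : pvJoin (l₁ ++ l₂) = pvJoin l₁ ++ pvJoin l₂ := by
  induction l₁ with
  | nil => simp [pvJoin]
  | cons s r ih => simp [pvJoin, ih, String.append_assoc]

theorem pvJoin_flatMap {α : Type} (f : α → List String) (l : List α) :
    pvJoin (l.flatMap f) = pvJoin (l.map (fun x => pvJoin (f x))) := by
  induction l with
  | nil => simp [pvJoin]
  | cons x r ih => simp [pvJoin, pvJoin_append, ih]

theorem strJoin_eq_pvJoin (l : List String) : PySem.Str.join "" l = pvJoin l := by
  induction l with
  | nil => simp [PySem.Str.join, PySem.Chars.join_nil, pvJoin]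
  | cons s r ih =>
    cases r with
    | nil => simp [PySem.Str.join, PySem.Chars.join_singleton, pvJoin]
    | cons t r' =>
      simp only [PySem.Str.join, List.map_cons] at ih ⊢
      rw [show ("" : String).toList = [] from rfl] at ih ⊢
      rw [PySem.Chars.join_cons_cons]
      simp only [List.append_nil, String.ofList_append] at *
      rw [ih]; simp [pvJoin]

/-- A fold that conditionally appends a string equals the accumulator followed by the
    joined contributions (shape of A's inner loop). -/
theorem foldl_two_if (p q : Int → Prop) [DecidablePred p] [DecidablePred q]
    (g : Int → String) (l : List Int) : ∀ s : String,
    l.foldl (fun acc x => if p x then acc else if q x then acc ++ g x else acc) s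
      = s ++ pvJoin ((l.filter (fun x => decide (¬ p x ∧ q x))).map g) := by
  induction l with
  | nil => intro s; simp [pvJoin]
  | cons x r ih =>
    intro s
    simp only [List.foldl_cons, List.filter_cons]
    by_cases hp : p x
    · simp [hp, ih]
    · by_cases hq : q x
      · simp [hp, hq, ih, pvJoin, String.append_assoc]
      · simp [hp, hq, ih]

/-- A fold whose step appends a per-element string equals accumulator ++ join. -/
theorem foldl_str (f : String → Int → String) (h : Int → String) (l : List Int)
    (H : ∀ (s : String), ∀ x ∈ l, f s x = s ++ h x) : ∀ s, l.foldl f s = s ++ pvJoin (l.map h) := by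
  induction l with
  | nil => intro s; simp [pvJoin]
  | cons x r ih =>
    intro s
    simp only [List.foldl_cons, List.map_cons, pvJoin]
    rw [H s x (by simp), ih (fun s x hx => H s x (by simp [hx])), String.append_assoc]

theorem mod_ne_zero_of_lt (n d : Int) (h0 : 0 < n) (h : n < d) : PySem.Int.mod n d ≠ 0 := by
  simp only [ne_eq, PySem.Int.mod_eq_zero_iff_dvd]
  intro hdvd
  have := Int.le_of_dvd h0 hdvd
  omega

theorem filter_drop_low (P : Int → Bool) (a m b : Int) (h1 : a ≤ m) (h2 : m ≤ b)
    (h : ∀ d, a ≤ d → d < m → P d = false) :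
    (PySem.List.pyRange a b 1).filter P = (PySem.List.pyRange m b 1).filter P := by
  rw [PySem.List.pyRange_one_append a m b h1 h2, List.filter_append,
    List.filter_eq_nil_iff.mpr, List.nil_append]
  intro d hd
  have := PySem.List.mem_pyRange_one.mp hd
  simp [h d this.1 this.2]

theorem filter_drop_high (P : Int → Bool) (a m b : Int) (h1 : a ≤ m) (h2 : m ≤ b)
    (h : ∀ d, m ≤ d → d < b → P d = false) :
    (PySem.List.pyRange a b 1).filter P = (PySem.List.pyRange a m 1).filter P := by
  have hnil : (PySem.List.pyRange m b 1).filter P = [] := by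
    apply List.filter_eq_nil_iff.mpr
    intro d hd
    have := PySem.List.mem_pyRange_one.mp hd
    simp [h d this.1 this.2]
  rw [PySem.List.pyRange_one_append a m b h1 h2, List.filter_append, hnil, List.append_nil]

theorem pyRange_shift (c a b : Int) :
    PySem.List.pyRange (c + a) (c + b) 1 = (PySem.List.pyRange a b 1).map (fun x => c + x) := by
  rw [PySem.List.pyRange_one, PySem.List.pyRange_one, List.map_map]
  have hlen : c + b - (c + a) = b - a := by ring
  rw [hlen]
  apply List.map_congr_left
  intro k _
  simp only [Function.comp_apply]
  ring

/-- Core combinatorial step: for 1 ≤ i < n, A's inner selection over j equals B's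
    selection of divisors d = i + j. -/
theorem inner_eq (n i : Int) (h1 : 1 ≤ i) (h2 : i < n) :
    ((PySem.List.pyRange 2 n 1).filter
        (fun j => decide (¬ j ≤ i ∧ PySem.Int.mod n (i + j) = 0))).map
      (fun j => PySem.Int.toStr i ++ PySem.Int.toStr j)
    = (((PySem.List.pyRange 1 (n + 1) 1).filter
          (fun d => decide (PySem.Int.mod n d = 0))).filter
          (fun d => decide (2 * i < d ∧ d ≤ n - 1 + i))).map
      (fun d => PySem.Int.toStr i ++ PySem.Int.toStr (d - i)) := by
  have hPd : ∀ l : List Int,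
      (l.filter (fun d => decide (PySem.Int.mod n d = 0))).filter
          (fun d => decide (2 * i < d ∧ d ≤ n - 1 + i))
        = l.filter (fun d => decide ((2 * i < d ∧ d ≤ n - 1 + i) ∧ PySem.Int.mod n d = 0)) := by
    intro l
    rw [List.filter_filter]
    apply List.filter_congr
    intro d _
    simp [Bool.decide_and]
  rw [hPd]
  -- narrow B's range [1, n+1) to [i+2, n+1)
  rw [filter_drop_low _ 1 (i + 2) (n + 1) (by omega) (by omega)
    (by intro d hd1 hd2; simp only [decide_eq_false_iff_not]; rintro ⟨⟨ha, hb⟩, _⟩; omega)]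
  -- rewrite A's side as a filter over the shifted range [i+2, i+n)
  have hshift : PySem.List.pyRange (i + 2) (i + n) 1
      = (PySem.List.pyRange 2 n 1).map (fun x => i + x) := pyRange_shift i 2 n
  have hA : ((PySem.List.pyRange 2 n 1).filter
        (fun j => decide (¬ j ≤ i ∧ PySem.Int.mod n (i + j) = 0))).map
      (fun j => PySem.Int.toStr i ++ PySem.Int.toStr j)
      = ((PySem.List.pyRange (i + 2) (i + n) 1).filter
          (fun d => decide ((2 * i < d ∧ d ≤ n - 1 + i) ∧ PySem.Int.mod n d = 0))).map
        (fun d => PySem.Int.toStr i ++ PySem.Int.toStr (d - i)) := by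
    rw [hshift, List.filter_map, List.map_map]
    have hfil : (PySem.List.pyRange 2 n 1).filter
          ((fun d => decide ((2 * i < d ∧ d ≤ n - 1 + i) ∧ PySem.Int.mod n d = 0)) ∘ (fun x => i + x))
        = (PySem.List.pyRange 2 n 1).filter
          (fun j => decide (¬ j ≤ i ∧ PySem.Int.mod n (i + j) = 0)) := by
      apply List.filter_congr
      intro j hj
      have hj' := PySem.List.mem_pyRange_one.mp hj
      simp only [Function.comp_apply, decide_eq_decide]
      constructor
      · rintro ⟨⟨ha, hb⟩, hc⟩; exact ⟨by omega, hc⟩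
      · rintro ⟨ha, hc⟩; exact ⟨⟨by omega, by omega⟩, hc⟩
    rw [hfil]
    apply List.map_congr_left
    intro j _
    simp only [Function.comp_apply]
    have : i + j - i = j := by ring
    rw [this]
  rw [hA]
  -- narrow A's range [i+2, i+n) to [i+2, n+1): above n nothing divides n
  have hn2 : (0 : Int) < n := by omega
  rw [filter_drop_high _ (i + 2) (n + 1) (i + n) (by omega) (by omega)
    (by
      intro d hd1 hd2
      simp only [decide_eq_false_iff_not]
      rintro ⟨_, hmod⟩
      exact mod_ne_zero_of_lt n d hn2 (by omega) hmod)]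

-- ===== VERDICT (by name: the statement is the Claim_ definition above) =====
theorem get_rebus_spec : Claim_equal_get_rebus := by
  intro n _
  unfold Spec_get_rebus get_rebus
  simp only [get_rebus_alt]
  -- A: outer loop appends per-i joined strings
  rw [foldl_str _
      (fun i => pvJoin (((PySem.List.pyRange 2 n 1).filter
          (fun j => decide (¬ j ≤ i ∧ PySem.Int.mod n (i + j) = 0))).map
        (fun j => PySem.Int.toStr i ++ PySem.Int.toStr j)))
      (PySem.List.pyRange 1 n 1)
      (by
        intro s i _
        rw [PySem.List.foldl_congr_mem _ _
            (fun acc j => if j ≤ i then acc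
              else if PySem.Int.mod n (i + j) = 0 then
                acc ++ (PySem.Int.toStr i ++ PySem.Int.toStr j)
              else acc) _
            (by
              intro acc j _
              by_cases hp : j ≤ i
              · simp [hp]
              · by_cases hq : PySem.Int.mod n (i + j) = 0
                · simp [hp, hq, String.append_assoc]
                · simp [hp, hq])]
        exact foldl_two_if (fun j => j ≤ i) (fun j => PySem.Int.mod n (i + j) = 0)
          (fun j => PySem.Int.toStr i ++ PySem.Int.toStr j) _ s),
    String.empty_append]
  -- B: the two loops build the flatMap of per-i divisor selections
  rw [PySem.List.foldl_congr_mem _ _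
      (fun parts i => parts ++
        ((((PySem.List.pyRange 1 (n + 1) 1).filter
            (fun d => decide (PySem.Int.mod n d = 0))).filter
            (fun d => decide (2 * i < d ∧ d ≤ n - 1 + i))).map
          (fun d => PySem.Int.toStr i ++ PySem.Int.toStr (d - i)))) _
      (by
        intro parts i _
        exact PySem.List.foldl_append_ite
          (fun d => 2 * i < d ∧ d ≤ n - 1 + i)
          (fun d => PySem.Int.toStr i ++ PySem.Int.toStr (d - i)) _ parts),
    PySem.List.foldl_append_eq_flatMap, List.nil_append, strJoin_eq_pvJoin, pvJoin_flatMap]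
  congr 1
  apply List.map_congr_left
  intro i hi
  have hi' := PySem.List.mem_pyRange_one.mp hi
  rw [inner_eq n i hi'.1 hi'.2]
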